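-- pv_equiv track=rewrite | github.com/app-app-app-app/site-launcher-test | core/lang_pipeline.py | _apply_strings
-- ===== SOURCE A (Python) =====
-- from typing import Dict, List, Optional, Callable, Tuple
--
-- def _escape_php_string_for_quote(s: str, quote: str) -> str:
--     """
--     Екранування рядка перед вставкою всередину PHP-літерала.
--     quote: "'" або '"'
--     """
--     # завжди екрануємо бекслеш
--     s = s.replace("\\", "\\\\")
--
--     if quote == "'":
--         # у single quotes потрібно екранувати тільки апостроф
--         s = s.replace("'", "\\'")
--     else:
--         # у double quotes екрануємо тільки подвійні лапки
--         # НЕ чіпаємо $, інакше $source стане \$source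
--         s = s.replace('"', '\\"')
--
--     return s
--
-- def _escape_php_string(s: str) -> str:
--     # fallback: безпечне екранування для single-quoted PHP рядків
--     return s.replace("\\", "\\\\").replace("'", "\\'")
--
-- def _apply_strings(content: str, spans: List[Tuple[int, int]], outs: List[str]) -> str:
--     if len(spans) != len(outs):
--         return content
--
--     pairs = list(zip(spans, outs))
--     pairs.sort(key=lambda x: x[0][0], reverse=True)
--
--     for (start, end), new_text in pairs:
--         # визначаємо, які лапки були в оригіналі (символ перед start)
--         quote = '"'
--         if start - 1 >= 0 and content[start - 1] in {"'", '"'}: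
--             quote = content[start - 1]
--
--         safe = _escape_php_string_for_quote(new_text, quote)
--         content = content[:start] + safe + content[end:]
--
--     return content
--
--     pairs = list(zip(spans, outs))
--     pairs.sort(key=lambda x: x[0][0], reverse=True)
--     for (start, end), new_text in pairs:
--         content = content[:start] + _escape_php_string(new_text) + content[end:]
--     return content
-- ===== SOURCE B (Python) =====
-- def _escape_php_string_for_quote(s: str, quote: str) -> str:
--     s = s.replace("\\", "\\\\")
--     if quote == "'":
--         s = s.replace("'", "\\'")
--     else:
--         s = s.replace('"', '\\"')
--     return s
--
-- def _apply_strings(content, spans, outs):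
--     if len(spans) != len(outs):
--         return content
--     pairs = sorted(zip(spans, outs), key=lambda x: x[0][0])
--     parts = []
--     pos = 0
--     for (start, end), new_text in pairs:
--         quote = '"'
--         if start - 1 >= 0 and content[start - 1] in ("'", '"'):
--             quote = content[start - 1]
--         parts.append(content[pos:start])
--         parts.append(_escape_php_string_for_quote(new_text, quote))
--         pos = end
--     parts.append(content[pos:])
--     return "".join(parts)
-- ===== Notes on version B (the rewrite author's own statement) =====
-- stated objective: alternative
-- what changed: Instead of sorting spans descending and rebuilding the whole string with a full splice per replacement, B sorts the spans ascending once and makes a single forward pass, collecting the unchanged segments and the quote-escaped replacements into a list joined once at the end.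
-- outside the precondition, e.g. on _apply_strings('abcdef', [(1, 5), (2, 3)], ['X', 'Y']): A returns 'aXf', B returns 'aXYdef'; on _apply_strings('abcde', [(2, 2), (2, 5)], ['X', 'Y']): A returns 'abYe', B returns 'abXY'
import Mathlib
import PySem

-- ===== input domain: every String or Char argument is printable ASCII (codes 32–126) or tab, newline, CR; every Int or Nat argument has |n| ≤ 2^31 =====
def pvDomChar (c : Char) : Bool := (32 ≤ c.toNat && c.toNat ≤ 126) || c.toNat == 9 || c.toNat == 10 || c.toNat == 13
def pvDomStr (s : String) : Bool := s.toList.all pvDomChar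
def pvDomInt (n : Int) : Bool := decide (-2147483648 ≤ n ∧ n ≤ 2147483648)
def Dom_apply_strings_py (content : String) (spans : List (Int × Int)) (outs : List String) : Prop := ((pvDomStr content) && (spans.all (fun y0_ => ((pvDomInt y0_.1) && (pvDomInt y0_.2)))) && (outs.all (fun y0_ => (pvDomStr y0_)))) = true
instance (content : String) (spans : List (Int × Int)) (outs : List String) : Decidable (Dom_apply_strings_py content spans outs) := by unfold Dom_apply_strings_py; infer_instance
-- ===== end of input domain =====

-- B replaces A's descending per-span full-string splices by one ascending pass that joins the
-- unchanged segments with the quote-escaped replacements; equal on disjoint in-range spans.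

-- ===== PORT A =====
-- shared module helper `_escape_php_string_for_quote` (called verbatim by both A and B)
def escape_php_string_for_quote (s : String) (quote : String) : String :=
  let s1 := PySem.Str.replace s "\\" "\\\\"
  if quote = "'" then PySem.Str.replace s1 "'" "\\'"
  else PySem.Str.replace s1 "\"" "\\\""

-- `quote = '"'; if start - 1 >= 0 and content[start - 1] in {"'", '"'}: quote = content[start - 1]`
-- (the `none` branch of pyGet? is Python's IndexError; those inputs lie outside Pre_)
def pvQuoteAt (content : String) (start : Int) : String :=
  if start - 1 ≥ 0 then
    match PySem.Str.pyGet? content (start - 1) with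
    | some c => if c = '\'' ∨ c = '"' then String.mk [c] else "\""
    | none => "\""
  else "\""

-- body of A's loop: `safe = _escape_php_string_for_quote(new_text, quote); content = content[:start] + safe + content[end:]`
def pvStepA (content : String) (p : (Int × Int) × String) : String :=
  let quote := pvQuoteAt content p.1.1
  let safe := escape_php_string_for_quote p.2 quote
  PySem.Str.join "" [PySem.Str.slice content none (some p.1.1), safe,
                     PySem.Str.slice content (some p.1.2) none]

def apply_strings_py (content : String) (spans : List (Int × Int)) (outs : List String) : String :=
  if spans.length ≠ outs.length then content
  else
    let pairs := spans.zip outs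
    let pairsSorted := PySem.List.sorted pairs (fun x => x.1.1) true
    pairsSorted.foldl pvStepA content

-- ===== PORT B =====
-- body of B's loop: append `content[pos:start]` and the escaped replacement to `parts`, move `pos` to `end`
def pvStepB (content : String) (st : List String × Int) (p : (Int × Int) × String) : List String × Int :=
  let quote := pvQuoteAt content p.1.1
  (st.1 ++ [PySem.Str.slice content (some st.2) (some p.1.1),
            escape_php_string_for_quote p.2 quote], p.1.2)

def apply_strings_py_alt (content : String) (spans : List (Int × Int)) (outs : List String) : String :=
  if spans.length ≠ outs.length then content
  else
    let pairs := PySem.List.sorted (spans.zip outs) (fun x => x.1.1) false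
    let st := pairs.foldl (pvStepB content) ([], 0)
    PySem.Str.join "" (st.1 ++ [PySem.Str.slice content (some st.2) none])

-- ===== PRECONDITION & SPEC =====
-- Pre_ excludes (when the two lists have equal length, the only case where the spans matter) spans that are
-- out of the string's bounds, overlapping, or share a start: there A raises IndexError or its descending
-- in-place splices interact accidentally (the sensible domain of the function is disjoint in-range spans).
def Pre_apply_strings_py (content : String) (spans : List (Int × Int)) (outs : List String) : Prop :=
  spans.length = outs.length →
    ((∀ p ∈ spans, 0 ≤ p.1 ∧ p.1 ≤ p.2 ∧ p.2 ≤ (content.toList.length : Int)) ∧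
     List.Pairwise (fun p q : Int × Int => (p.2 ≤ q.1 ∨ q.2 ≤ p.1) ∧ p.1 ≠ q.1) spans)
instance (content : String) (spans : List (Int × Int)) (outs : List String) : Decidable (Pre_apply_strings_py content spans outs) := by unfold Pre_apply_strings_py; infer_instance

def pvWitness_apply_strings_py : String × (List (Int × Int)) × List String :=
  ("x = 'ab'; y = \"cd\";", [(5, 7), (15, 17)], ["p'q", "r\"s"])

def Spec_apply_strings_py (content : String) (spans : List (Int × Int)) (outs : List String) (out : String) : Prop := out = apply_strings_py_alt content spans outs
instance (content : String) (spans : List (Int × Int)) (outs : List String) (out : String) : Decidable (Spec_apply_strings_py content spans outs out) := by unfold Spec_apply_strings_py; infer_instance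

-- ===== CLAIM (what is proved, stated in full; the proofs are below) =====
def Claim_equal_apply_strings_py : Prop := ∀ (content : String) (spans : List (Int × Int)) (outs : List String), Dom_apply_strings_py content spans outs → Pre_apply_strings_py content spans outs → Spec_apply_strings_py content spans outs (apply_strings_py content spans outs)

-- ===== LEMMAS AND PROOFS =====

-- the joint value of both programs: original prefix pieces interleaved with escaped replacements
def pvBuild (content : String) (pos : Nat) : List ((Int × Int) × String) → List Char
  | [] => content.toList.drop pos
  | p :: rest =>
      (content.toList.take p.1.1.toNat).drop pos
      ++ (escape_php_string_for_quote p.2 (pvQuoteAt content p.1.1)).toList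
      ++ pvBuild content p.1.2.toNat rest

theorem pvJoinNil (ls : List (List Char)) : PySem.Chars.join [] ls = ls.flatten := by
  induction ls with
  | nil => simp [PySem.Chars.join_nil]
  | cons a rest ih =>
    cases rest with
    | nil => simp [PySem.Chars.join_singleton]
    | cons b r => simp [PySem.Chars.join_cons_cons, ih]

theorem pvQuoteAt_congr (X content : String) (s : Int) (e : Nat)
    (hse : s ≤ (e : Int)) (hX : X.toList.take e = content.toList.take e) :
    pvQuoteAt X s = pvQuoteAt content s := by
  unfold pvQuoteAt
  by_cases h : s - 1 ≥ 0
  · simp only [h, if_true]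
    have hi : (s - 1).toNat < e := by omega
    have hget : PySem.Str.pyGet? X (s - 1) = PySem.Str.pyGet? content (s - 1) := by
      rw [PySem.Str.pyGet?_eq, PySem.Str.pyGet?_eq,
          PySem.Chars.pyGet?_eq_listPyGet?, PySem.Chars.pyGet?_eq_listPyGet?,
          PySem.List.pyGet?_of_nonneg _ h, PySem.List.pyGet?_of_nonneg _ h]
      have h1 : X.toList[(s - 1).toNat]? = (X.toList.take e)[(s - 1).toNat]? := by
        rw [List.getElem?_take, if_pos hi]
      have h2 : content.toList[(s - 1).toNat]? = (content.toList.take e)[(s - 1).toNat]? := by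
        rw [List.getElem?_take, if_pos hi]
      rw [h1, h2, hX]
    rw [hget]
  · simp only [h, if_false]

theorem pvMainA (S : List ((Int × Int) × String)) (content : String) (pos : Nat)
    (hb : ∀ p ∈ S, 0 ≤ p.1.1 ∧ p.1.1 ≤ p.1.2 ∧ p.1.2 ≤ (content.toList.length : Int))
    (hchain : S.Pairwise (fun p q => p.1.2 ≤ q.1.1))
    (hpos : ∀ p ∈ S, (pos : Int) ≤ p.1.1)
    (hlen : pos ≤ content.toList.length) :
    (List.foldr (fun p acc => pvStepA acc p) content S).toList
      = content.toList.take pos ++ pvBuild content pos S := by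
  induction S generalizing pos with
  | nil => simp [pvBuild]
  | cons p rest ih =>
    obtain ⟨hs0, hse, hel⟩ := hb p (List.mem_cons_self ..)
    have he0 : (0 : Int) ≤ p.1.2 := le_trans hs0 hse
    have hcast : ((p.1.2.toNat : Nat) : Int) = p.1.2 := Int.toNat_of_nonneg he0
    have hX := ih p.1.2.toNat (fun q hq => hb q (List.mem_cons_of_mem _ hq))
      (List.Pairwise.of_cons hchain)
      (fun q hq => by
        have := (List.pairwise_cons.mp hchain).1 q hq
        omega)
      (Int.toNat_le.mpr hel)
    set X := List.foldr (fun p acc => pvStepA acc p) content rest with hXdef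
    have hlentake : (content.toList.take p.1.2.toNat).length = p.1.2.toNat := by
      rw [List.length_take]; omega
    have htakeE : X.toList.take p.1.2.toNat = content.toList.take p.1.2.toNat := by
      rw [hX, List.take_append_of_le_length hlentake.ge, List.take_take, Nat.min_self]
    show (pvStepA X p).toList = _
    unfold pvStepA
    rw [PySem.Str.toList_join]
    simp only [List.map_cons, List.map_nil, String.toList_empty]
    rw [pvJoinNil]
    simp only [List.flatten_cons, List.flatten_nil, List.append_nil]
    rw [PySem.Str.toList_slice, PySem.Str.toList_slice,
        PySem.Chars.slice_eq_listSlice, PySem.Chars.slice_eq_listSlice,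
        PySem.List.slice_to _ hs0, PySem.List.slice_from _ he0]
    rw [pvQuoteAt_congr X content p.1.1 p.1.2.toNat (by omega) htakeE]
    have hdrop : X.toList.drop p.1.2.toNat = pvBuild content p.1.2.toNat rest := by
      rw [hX, List.drop_left' hlentake]
    have htakeS : X.toList.take p.1.1.toNat = content.toList.take p.1.1.toNat := by
      rw [hX, List.take_append_of_le_length (by rw [hlentake]; omega), List.take_take]
      congr 1; omega
    rw [hdrop, htakeS]
    show _ = content.toList.take pos ++ ((content.toList.take p.1.1.toNat).drop pos
      ++ (escape_php_string_for_quote p.2 (pvQuoteAt content p.1.1)).toList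
      ++ pvBuild content p.1.2.toNat rest)
    have hposS : pos ≤ p.1.1.toNat := by
      have := hpos p (List.mem_cons_self ..); omega
    have htp : content.toList.take pos = (content.toList.take p.1.1.toNat).take pos := by
      rw [List.take_take]; congr 1; omega
    rw [htp]
    simp only [← List.append_assoc]
    rw [List.take_append_drop]

theorem pvMainB (content : String) (S : List ((Int × Int) × String)) (parts : List String) (pos : Nat)
    (hb : ∀ p ∈ S, 0 ≤ p.1.1 ∧ 0 ≤ p.1.2) :
    (PySem.Str.join "" ((S.foldl (pvStepB content) (parts, (pos : Int))).1
        ++ [PySem.Str.slice content (some (S.foldl (pvStepB content) (parts, (pos : Int))).2) none])).toList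
      = (parts.map String.toList).flatten ++ pvBuild content pos S := by
  induction S generalizing parts pos with
  | nil =>
    simp only [List.foldl_nil, pvBuild]
    rw [PySem.Str.toList_join]
    simp only [List.map_append, List.map_cons, List.map_nil, String.toList_empty]
    rw [pvJoinNil]
    simp only [List.flatten_append, List.flatten_cons, List.flatten_nil, List.append_nil]
    rw [PySem.Str.toList_slice, PySem.Chars.slice_eq_listSlice, PySem.List.slice_from_natCast]
  | cons p rest ih =>
    obtain ⟨hs0, he0⟩ := hb p (List.mem_cons_self ..)
    have hcast : p.1.2 = ((p.1.2.toNat : Nat) : Int) := (Int.toNat_of_nonneg he0).symm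
    have hrest : ∀ q ∈ rest, 0 ≤ q.1.1 ∧ 0 ≤ q.1.2 := fun q hq => hb q (List.mem_cons_of_mem _ hq)
    rw [List.foldl_cons]
    simp only [pvStepB]
    rw [hcast, ih _ p.1.2.toNat hrest]
    simp only [List.map_append, List.map_cons, List.map_nil, List.flatten_append,
      List.flatten_cons, List.flatten_nil, List.append_nil, pvBuild]
    rw [PySem.Str.toList_slice, PySem.Chars.slice_eq_listSlice,
        PySem.List.slice_toNat content.toList (Int.natCast_nonneg pos) hs0]
    simp only [Int.toNat_natCast, List.drop_take]
    simp

-- ===== VERDICT (by name: the statement is the Claim_ definition above) =====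
theorem apply_strings_py_spec : Claim_equal_apply_strings_py := by
  intro content spans outs hdom hpre
  unfold Spec_apply_strings_py apply_strings_py apply_strings_py_alt
  by_cases hl : spans.length = outs.length
  · rw [if_neg (fun h => h hl), if_neg (fun h => h hl)]
    obtain ⟨hb0, hpw⟩ := hpre hl
    have hmem : ∀ p ∈ PySem.List.sorted (spans.zip outs) (fun x => x.1.1) false, p.1 ∈ spans := by
      intro p hp
      rcases p with ⟨pr, t⟩
      exact (List.of_mem_zip ((PySem.List.mem_sorted ..).mp hp)).1
    have hb : ∀ p ∈ PySem.List.sorted (spans.zip outs) (fun x => x.1.1) false,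
        0 ≤ p.1.1 ∧ p.1.1 ≤ p.1.2 ∧ p.1.2 ≤ (content.toList.length : Int) :=
      fun p hp => hb0 p.1 (hmem p hp)
    have hfst : (spans.zip outs).map Prod.fst = spans := List.map_fst_zip (le_of_eq hl)
    have hpwPairs : (spans.zip outs).Pairwise
        (fun a b : (Int × Int) × String => (a.1.2 ≤ b.1.1 ∨ b.1.2 ≤ a.1.1) ∧ a.1.1 ≠ b.1.1) := by
      rw [← hfst] at hpw
      exact List.pairwise_map.mp hpw
    have hpwS := hpwPairs.perm (PySem.List.sorted_perm (spans.zip outs) (fun x => x.1.1) false).symm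
      (fun h => ⟨h.1.elim Or.inr Or.inl, h.2.symm⟩)
    have hle : (PySem.List.sorted (spans.zip outs) (fun x => x.1.1) false).Pairwise
        (fun a b => a.1.1 ≤ b.1.1) := PySem.List.sorted_pairwise (spans.zip outs) (fun x => x.1.1)
    have hchain : (PySem.List.sorted (spans.zip outs) (fun x => x.1.1) false).Pairwise
        (fun p q => p.1.2 ≤ q.1.1) := by
      refine (hle.and hpwS).imp_of_mem (fun {a b} ha hb' h => ?_)
      rcases h.2.1 with h2 | h2
      · exact h2
      · exfalso
        have hba := hb0 b.1 (hmem b hb')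
        have haa := hb0 a.1 (hmem a ha)
        have := h.2.2
        omega
    have hdesc : PySem.List.sorted (spans.zip outs) (fun x => x.1.1) true
        = (PySem.List.sorted (spans.zip outs) (fun x => x.1.1) false).reverse := by
      refine PySem.List.sorted_rev_eq_of_perm_of_pairwise_gt _ _ _
        ((PySem.List.sorted (spans.zip outs) (fun x => x.1.1) false).reverse_perm.trans
          (PySem.List.sorted_perm ..)) ?_
      rw [List.pairwise_reverse]
      exact (hle.and hpwS).imp (fun h => lt_of_le_of_ne h.1 h.2.2)
    have hA := pvMainA (PySem.List.sorted (spans.zip outs) (fun x => x.1.1) false) content 0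
      hb hchain (fun p hp => by exact_mod_cast (hb p hp).1) (Nat.zero_le _)
    have hB := pvMainB content (PySem.List.sorted (spans.zip outs) (fun x => x.1.1) false) [] 0
      (fun p hp => ⟨(hb p hp).1, le_trans (hb p hp).1 (hb p hp).2.1⟩)
    apply String.toList_inj.mp
    show (List.foldl pvStepA content (PySem.List.sorted (spans.zip outs) (fun x => x.1.1) true)).toList
      = (PySem.Str.join "" ((List.foldl (pvStepB content) ([], 0)
            (PySem.List.sorted (spans.zip outs) (fun x => x.1.1) false)).1
          ++ [PySem.Str.slice content (some (List.foldl (pvStepB content) ([], 0)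
            (PySem.List.sorted (spans.zip outs) (fun x => x.1.1) false)).2) none])).toList
    rw [hdesc, List.foldl_reverse, hA]
    simp only [Nat.cast_zero] at hB
    simp only [List.take_zero, List.nil_append, List.map_nil, List.flatten_nil] at hA hB ⊢
    exact hB.symm
  · rw [if_pos hl, if_pos hl]
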